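-- pv_equiv track=rewrite | github.com/wilofice/pegasus | backend/services/ner_service.py | get_entity_frequencies
-- ===== SOURCE A (Python) =====
-- from typing import List, Dict, Any, Optional
--
-- def get_entity_frequencies(
--
--     entities: List[Dict[str, Any]]
-- ) -> Dict[str, Dict[str, int]]:
--     """Get frequency counts for entities by type.
--
--     Args:
--         entities: List of entity dictionaries
--
--     Returns:
--         Dictionary with entity type frequencies
--     """
--     frequencies = {}
--
--     for entity in entities:
--         label = entity.get('label', 'UNKNOWN')
--         text = entity.get('text', '').strip()
--
--         if label not in frequencies:
--             frequencies[label] = {}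
--
--         if text:
--             frequencies[label][text] = frequencies[label].get(text, 0) + 1
--
--     return frequencies
-- ===== SOURCE B (Python) =====
-- def get_entity_frequencies(entities):
--     """Flat reshaping: flatten to (label, stripped-text) pairs once, then build
--     the nested result with comprehensions over that flat list — distinct labels
--     in first-occurrence order, per label the distinct non-empty texts in
--     first-occurrence order, each counted by occurrences of its pair."""
--     pairs = [(e.get('label', 'UNKNOWN'), e.get('text', '').strip())
--              for e in entities]
--     return {
--         label: {t: pairs.count((label, t))
--                 for t in dict.fromkeys(t for l, t in pairs
--                                        if l == label and t)}
--         for label in dict.fromkeys(l for l, _ in pairs)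
--     }
-- ===== Notes on version B (the rewrite author's own statement) =====
-- stated objective: alternative
-- what changed: A incrementally builds the nested dict with running counts in one pass; B never builds dicts incrementally: it flattens the input to a flat list of (label, stripped text) pairs and reconstructs the nested result declaratively with nested comprehensions - dict.fromkeys for first-occurrence dedup of labels and of per-label non-empty texts, and pairs.count((label,t)) for each frequency.
import Mathlib
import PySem

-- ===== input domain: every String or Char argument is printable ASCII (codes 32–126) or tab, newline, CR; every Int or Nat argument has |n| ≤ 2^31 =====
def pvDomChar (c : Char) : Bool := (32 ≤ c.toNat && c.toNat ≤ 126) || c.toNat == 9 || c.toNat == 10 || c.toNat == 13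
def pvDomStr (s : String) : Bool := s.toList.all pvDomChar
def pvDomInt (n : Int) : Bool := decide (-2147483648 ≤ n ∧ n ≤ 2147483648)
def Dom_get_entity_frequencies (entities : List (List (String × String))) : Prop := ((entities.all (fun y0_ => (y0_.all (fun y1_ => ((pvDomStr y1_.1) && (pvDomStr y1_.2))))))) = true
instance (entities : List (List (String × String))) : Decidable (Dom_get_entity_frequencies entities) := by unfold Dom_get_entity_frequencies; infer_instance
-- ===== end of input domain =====

-- B replaces A's one-pass incremental nested-dict build by a declarative reshaping of a flat
-- (label, text) pair list with dedup + pair counting; same observable results, no speed claim.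

-- ===== PORT A =====
-- exact: entity.get(k, dflt) = (Dict.ofList entity).getD k dflt; 'if text:' = text ≠ "";
-- frequencies[label][text] = frequencies[label].get(text, 0) + 1 is modeled by Dict.modify
-- (exact here: label is guaranteed present after the preceding insert).
def get_entity_frequencies (entities : List (List (String × String))) : List (String × List (String × Int)) :=
  let frequencies :=
    entities.foldl (fun frequencies entity =>
      let ent := PySem.Dict.ofList entity
      let label := ent.getD "label" "UNKNOWN"
      let text := PySem.Str.strip (ent.getD "text" "")
      let frequencies :=
        if frequencies.contains label then frequencies
        else frequencies.insert label PySem.Dict.empty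
      if text ≠ "" then
        frequencies.modify label PySem.Dict.empty
          (fun inner => inner.insert text (inner.getD text 0 + 1))
      else frequencies)
      (PySem.Dict.empty : PySem.Dict String (PySem.Dict String Int))
  frequencies.items.map (fun p => (p.1, p.2.items))

-- ===== PORT B =====
-- exact: the pair-list comprehension is List.map; dict.fromkeys(…) as an ordered dedup is
-- PySem.List.dedup; 'if l == label and t' is the filter; pairs.count is PySem.List.count.
def get_entity_frequencies_alt (entities : List (List (String × String))) : List (String × List (String × Int)) :=
  let pairs := entities.map (fun e =>
    let ent := PySem.Dict.ofList e
    (ent.getD "label" "UNKNOWN", PySem.Str.strip (ent.getD "text" "")))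
  (PySem.List.dedup (pairs.map Prod.fst)).map (fun label =>
    (label,
      (PySem.List.dedup
          ((pairs.filter (fun p => p.1 == label && !(p.2 == ""))).map Prod.snd)).map
        (fun t => (t, (PySem.List.count pairs (label, t) : Int)))))

-- ===== PRECONDITION & SPEC =====
def Spec_get_entity_frequencies (entities : List (List (String × String))) (out : List (String × List (String × Int))) : Prop := out = get_entity_frequencies_alt entities
instance (entities : List (List (String × String))) (out : List (String × List (String × Int))) : Decidable (Spec_get_entity_frequencies entities out) := by unfold Spec_get_entity_frequencies; infer_instance

-- ===== CLAIM (what is proved, stated in full; the proofs are below) =====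
def Claim_equal_get_entity_frequencies : Prop := ∀ (entities : List (List (String × String))), Dom_get_entity_frequencies entities → Spec_get_entity_frequencies entities (get_entity_frequencies entities)

-- ===== LEMMAS AND PROOFS =====

-- 'pvCnt ts' = Counter of the non-empty strings of ts, in first-occurrence order.
def pvCnt (ts : List String) : PySem.Dict String Int :=
  PySem.Dict.counter (ts.filter (fun t => !(t == "")))

-- map a function over the values of a dict, keeping keys and order
def pvMapVals {α β : Type} (φ : α → β) (g : PySem.Dict String α) : PySem.Dict String β :=
  PySem.Dict.mk (g.items.map (fun p => (p.1, φ p.2)))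

theorem pvCnt_nil : pvCnt [] = PySem.Dict.empty := rfl

theorem pvMapVals_empty {α β : Type} (φ : α → β) :
    pvMapVals φ PySem.Dict.empty = PySem.Dict.empty := rfl

theorem contains_pvMapVals {α β : Type} (φ : α → β) (g : PySem.Dict String α) (k : String) :
    (pvMapVals φ g).contains k = g.contains k := by
  simp [pvMapVals, PySem.Dict.contains, List.any_map, Function.comp_def]

theorem keys_pvMapVals {α β : Type} (φ : α → β) (g : PySem.Dict String α) :
    (pvMapVals φ g).keys = g.keys := by
  simp [pvMapVals, PySem.Dict.keys, List.map_map, Function.comp_def]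

theorem getD_pvMapVals {α β : Type} (φ : α → β) (g : PySem.Dict String α) (k : String) (d0 : α) :
    (pvMapVals φ g).getD k (φ d0) = φ (g.getD k d0) := by
  simp only [pvMapVals, PySem.Dict.getD, PySem.Dict.get?, List.find?_map]
  have : ((fun p : String × β => p.1 == k) ∘ fun p : String × α => (p.1, φ p.2))
      = fun p : String × α => p.1 == k := by funext p; rfl
  rw [this]
  cases List.find? (fun p : String × α => p.1 == k) g.items <;> rfl

theorem insert_pvMapVals {α β : Type} (φ : α → β) (g : PySem.Dict String α) (k : String) (w : α) :
    pvMapVals φ (g.insert k w) = (pvMapVals φ g).insert k (φ w) := by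
  apply PySem.Dict.ext
  by_cases h : g.contains k = true
  · have h2 : (pvMapVals φ g).contains k = true := by rw [contains_pvMapVals]; exact h
    rw [show (pvMapVals φ (g.insert k w)).items
        = (g.insert k w).items.map (fun p => (p.1, φ p.2)) from rfl,
      PySem.Dict.items_insert_of_contains g w h,
      PySem.Dict.items_insert_of_contains _ (φ w) h2,
      show (pvMapVals φ g).items = g.items.map (fun p => (p.1, φ p.2)) from rfl,
      List.map_map, List.map_map]
    apply List.map_congr_left
    intro p _
    by_cases hp : p.1 = k <;> simp [hp]
  · have h2 : (pvMapVals φ g).contains k = false := by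
      rw [contains_pvMapVals]; exact Bool.not_eq_true _ ▸ (eq_false_of_ne_true h)
    rw [show (pvMapVals φ (g.insert k w)).items
        = (g.insert k w).items.map (fun p => (p.1, φ p.2)) from rfl,
      PySem.Dict.items_insert_of_not_contains g w (eq_false_of_ne_true h),
      PySem.Dict.items_insert_of_not_contains _ (φ w) h2]
    simp [pvMapVals]

-- with Nodup keys, re-inserting the value already stored at a present key is a no-op
theorem insert_getD_self {α : Type} (g : PySem.Dict String α) (k : String) (d0 : α)
    (hn : g.keys.Nodup) (hc : g.contains k = true) :
    g.insert k (g.getD k d0) = g := by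
  apply PySem.Dict.ext
  rw [PySem.Dict.items_insert_of_contains g _ hc]
  conv_rhs => rw [← List.map_id g.items]
  apply List.map_congr_left
  intro p hp
  obtain ⟨pk, pv⟩ := p
  by_cases hpk : (pk == k) = true
  · have hk : pk = k := by simpa using hpk
    have hv : g.getD k d0 = pv := by
      apply PySem.Dict.getD_of_mem_items
      · rw [← hk]; exact hp
      · exact hn
    simp [hv, hk]
  · simp [hpk]

-- counting step: appending one stripped text to a group updates its counter exactly
-- the way A's inner-dict update does
theorem pvCnt_append (ts : List String) (t : String) (ht : t ≠ "") :
    pvCnt (ts ++ [t]) = (pvCnt ts).insert t ((pvCnt ts).getD t 0 + 1) := by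
  have hfil : (ts ++ [t]).filter (fun t => !(t == "")) =
      ts.filter (fun t => !(t == "")) ++ [t] := by
    simp [List.filter_append, ht]
  rw [pvCnt, hfil, PySem.Dict.counter_append_singleton]
  rfl

theorem pvCnt_append_empty (ts : List String) :
    pvCnt (ts ++ [""]) = pvCnt ts := by
  simp [pvCnt, List.filter_append]

-- one entity: A's update of the nested dict commutes with the grouping update
theorem pv_step_comm (g : PySem.Dict String (List String)) (hn : g.keys.Nodup)
    (l t : String) :
    (let frequencies := pvMapVals pvCnt g
     let frequencies :=
       if frequencies.contains l then frequencies
       else frequencies.insert l PySem.Dict.empty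
     if t ≠ "" then
       frequencies.modify l PySem.Dict.empty
         (fun inner => inner.insert t (inner.getD t 0 + 1))
     else frequencies)
    = pvMapVals pvCnt (g.modify l [] (· ++ [t])) := by
  have hmod : g.modify l [] (· ++ [t]) = g.insert l (g.getD l [] ++ [t]) := rfl
  rw [hmod, insert_pvMapVals]
  have hcont : (pvMapVals pvCnt g).contains l = g.contains l := contains_pvMapVals _ _ _
  have hgetD : (pvMapVals pvCnt g).getD l PySem.Dict.empty = pvCnt (g.getD l []) := by
    have := getD_pvMapVals pvCnt g l []
    rwa [pvCnt_nil] at this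
  by_cases hc : g.contains l = true
  · simp only [hcont, hc, if_pos]
    by_cases ht : t = ""
    · subst ht
      simp only [ne_eq, not_true_eq_false, if_false, pvCnt_append_empty]
      rw [← hgetD]
      exact (insert_getD_self (pvMapVals pvCnt g) l PySem.Dict.empty
        (by rw [keys_pvMapVals]; exact hn) (by rw [hcont]; exact hc)).symm
    · simp only [ne_eq, ht, not_false_iff, if_true, PySem.Dict.modify, hgetD,
        pvCnt_append _ _ ht]
  · simp only [hcont, hc, Bool.false_eq_true, if_neg, not_false_iff]
    have hg0 : g.getD l [] = [] := PySem.Dict.getD_of_not_contains g [] (by simpa using hc)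
    by_cases ht : t = ""
    · subst ht
      simp only [ne_eq, not_true_eq_false, if_false, hg0]
      rw [pvCnt_append_empty, pvCnt_nil]
    · simp only [ne_eq, ht, not_false_iff, if_true, PySem.Dict.modify,
        PySem.Dict.getD_insert_self, hg0, List.nil_append]
      rw [PySem.Dict.insert_insert_self]
      congr 1
      rw [show pvCnt [t] = PySem.Dict.counter [t] by simp [pvCnt, ht]]
      rfl

-- A's fold equals the nested counters of the grouping fold
theorem pv_fold_comm (es : List (List (String × String))) :
    ∀ (g : PySem.Dict String (List String)), g.keys.Nodup →
    es.foldl (fun frequencies entity =>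
      let ent := PySem.Dict.ofList entity
      let label := ent.getD "label" "UNKNOWN"
      let text := PySem.Str.strip (ent.getD "text" "")
      let frequencies :=
        if frequencies.contains label then frequencies
        else frequencies.insert label PySem.Dict.empty
      if text ≠ "" then
        frequencies.modify label PySem.Dict.empty
          (fun inner => inner.insert text (inner.getD text 0 + 1))
      else frequencies) (pvMapVals pvCnt g)
    = pvMapVals pvCnt (es.foldl (fun groups entity =>
        let ent := PySem.Dict.ofList entity
        groups.modify (ent.getD "label" "UNKNOWN") []
          (· ++ [PySem.Str.strip (ent.getD "text" "")])) g) := by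
  induction es with
  | nil => intro g _; rfl
  | cons e es ih =>
    intro g hn
    simp only [List.foldl_cons]
    rw [pv_step_comm g hn]
    exact ih _ (PySem.Dict.nodup_keys_insert g _ _ hn)

-- the characteristic pair of one entity
def pvToPair (e : List (String × String)) : String × String :=
  ((PySem.Dict.ofList e).getD "label" "UNKNOWN",
   PySem.Str.strip ((PySem.Dict.ofList e).getD "text" ""))

-- the grouping fold, over the flat pair list
theorem pv_group_items (pairs : List (String × String)) :
    (pairs.foldl (fun g p => g.modify p.1 [] (· ++ [p.2]))
        (PySem.Dict.empty : PySem.Dict String (List String))).items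
    = (PySem.Set.ofList (pairs.map Prod.fst)).map
        (fun l => (l, (pairs.filter (fun p => p.1 == l)).map Prod.snd)) := by
  set G := pairs.foldl (fun g p => g.modify p.1 [] (· ++ [p.2]))
      (PySem.Dict.empty : PySem.Dict String (List String)) with hG
  have hnodup : G.keys.Nodup := by
    rw [hG]
    exact PySem.Dict.nodup_keys_foldl_modify_key pairs Prod.fst []
      (fun g p => (· ++ [p.2])) PySem.Dict.empty PySem.Dict.nodup_keys_empty
  have hkeys : G.keys = PySem.Set.ofList (pairs.map Prod.fst) := by
    rw [hG]
    rw [PySem.Dict.keys_foldl_modify_key pairs Prod.fst []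
      (fun g p => (· ++ [p.2])) PySem.Dict.empty]
    rfl
  rw [PySem.Dict.items_eq_map_keys G hnodup [], hkeys]
  apply List.map_congr_left
  intro l _
  have hget : G.getD l [] = (pairs.filter (fun p => p.1 == l)).map Prod.snd := by
    rw [hG, PySem.Dict.getD_foldl_modify_append]
    rfl
  rw [hget]

-- counting a text's pair in the flat list = counting the text inside its label's group
theorem pv_count_pair (pairs : List (String × String)) (l t : String) (ht : t ≠ "") :
    ((((pairs.filter (fun p => p.1 == l)).map Prod.snd).filter
        (fun s => !(s == ""))).count t)
    = PySem.List.count pairs (l, t) := by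
  rw [PySem.List.count_eq]
  rw [List.count_eq_countP, List.count_eq_countP]
  rw [List.countP_filter, List.countP_map, List.countP_filter]
  apply List.countP_congr
  intro p _
  obtain ⟨a, b⟩ := p
  by_cases ha : a = l <;> by_cases hb : b = t <;>
    simp [ha, hb, ht, Prod.ext_iff]

-- ===== VERDICT (by name: the statement is the Claim_ definition above) =====
theorem get_entity_frequencies_spec : Claim_equal_get_entity_frequencies := by
  intro entities _
  unfold Spec_get_entity_frequencies get_entity_frequencies get_entity_frequencies_alt
  have h := pv_fold_comm entities PySem.Dict.empty PySem.Dict.nodup_keys_empty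
  rw [pvMapVals_empty] at h
  have h2 : entities.foldl (fun frequencies entity =>
      let ent := PySem.Dict.ofList entity
      let label := ent.getD "label" "UNKNOWN"
      let text := PySem.Str.strip (ent.getD "text" "")
      let frequencies :=
        if frequencies.contains label then frequencies
        else frequencies.insert label PySem.Dict.empty
      if text ≠ "" then
        frequencies.modify label PySem.Dict.empty
          (fun inner => inner.insert text (inner.getD text 0 + 1))
      else frequencies)
      (PySem.Dict.empty : PySem.Dict String (PySem.Dict String Int))
    = pvMapVals pvCnt ((entities.map pvToPair).foldl
        (fun g p => g.modify p.1 [] (· ++ [p.2])) PySem.Dict.empty) := by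
    rw [h, List.foldl_map]
    rfl
  rw [h2]
  set pairs := entities.map pvToPair with hpairs
  show ((pvMapVals pvCnt (pairs.foldl (fun g p => g.modify p.1 [] (· ++ [p.2]))
      PySem.Dict.empty)).items).map (fun p => (p.1, p.2.items))
    = (PySem.List.dedup (pairs.map Prod.fst)).map (fun label =>
        (label,
          (PySem.List.dedup
              ((pairs.filter (fun p => p.1 == label && !(p.2 == ""))).map Prod.snd)).map
            (fun t => (t, (PySem.List.count pairs (label, t) : Int)))))
  simp only [pvMapVals, List.map_map]
  rw [pv_group_items pairs, List.map_map]
  simp only [PySem.List.dedup_eq_ofList]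
  apply List.map_congr_left
  intro l _
  simp only [Function.comp_def]
  congr 1
  have hys : (((pairs.filter (fun p => p.1 == l)).map Prod.snd).filter
        (fun t => !(t == "")))
      = (pairs.filter (fun p => p.1 == l && !(p.2 == ""))).map Prod.snd := by
    rw [List.filter_map, List.filter_filter]
    apply congrArg (List.map Prod.snd)
    apply List.filter_congr
    intro p _
    simp [Bool.and_comm]
  rw [show pvCnt ((pairs.filter (fun p => p.1 == l)).map Prod.snd)
      = PySem.Dict.counter (((pairs.filter (fun p => p.1 == l)).map Prod.snd).filter
          (fun t => !(t == ""))) from rfl]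
  rw [PySem.Dict.items_counter]
  rw [hys]
  apply List.map_congr_left
  intro t htmem
  have ht : t ≠ "" := by
    rw [PySem.Set.mem_ofList] at htmem
    obtain ⟨p, hp, hpt⟩ := List.mem_map.mp htmem
    have := (List.mem_filter.mp hp).2
    subst hpt
    simp at this
    exact this.2
  congr 1
  rw [← hys, pv_count_pair pairs l t ht]
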